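-- pv_equiv track=rewrite | github.com/Mr-friendly-Spy/University-2.0 | informatica/practice_7/homework/Python/Var_6_num_2/Var_6_num_2.py | WorksWithSets
-- ===== SOURCE A (Python) =====
-- def WorksWithSets(A, B):
--
--     Z = set()
--     mx = 0
--     for i in A:
--         Z.add(i)
--
--     for i in A:
--         for j in B:
--             if i == j:
--                 Z.discard(i)
--
--     mx = max(Z)
--
--     return mx
-- ===== SOURCE B (Python) =====
-- def WorksWithSets(A, B):
--     forbidden = set(B)
--     for x in sorted(A, reverse=True):
--         if x not in forbidden:
--             return x
--     raise ValueError("max() arg is an empty sequence")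
-- ===== Notes on version B (the rewrite author's own statement) =====
-- stated objective: faster
-- what changed: Replaces A's build-set-of-A / nested A-by-B discard loop / max(set) with a set built from B, a descending sort of A, and an early-terminating scan returning the first element not in B's set.
import Mathlib
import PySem

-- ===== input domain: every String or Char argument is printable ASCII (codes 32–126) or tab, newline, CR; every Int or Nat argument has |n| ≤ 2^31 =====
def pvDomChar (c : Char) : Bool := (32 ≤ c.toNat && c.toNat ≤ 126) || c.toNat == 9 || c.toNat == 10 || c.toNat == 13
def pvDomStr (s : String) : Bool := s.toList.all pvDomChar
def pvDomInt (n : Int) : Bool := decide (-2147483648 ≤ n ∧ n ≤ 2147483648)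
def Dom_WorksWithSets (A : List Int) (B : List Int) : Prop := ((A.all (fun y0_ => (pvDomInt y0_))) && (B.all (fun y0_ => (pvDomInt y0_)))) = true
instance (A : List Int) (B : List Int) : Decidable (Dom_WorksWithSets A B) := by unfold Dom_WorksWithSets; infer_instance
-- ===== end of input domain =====

-- B replaces A's build-set-of-A / nested discard loop / max(set) by a set built
-- from B plus a descending sort of A scanned for the first eligible element
-- (alternative decomposition; both raise ValueError when no element qualifies).

-- ===== PORT A =====
-- literal port of A: Z = set(A); nested loop discarding i when i == j for j in B; max(Z).
-- max() raises on an empty set — that input is excluded by Pre_; the port returns 0 there.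
def WorksWithSets (A : List Int) (B : List Int) : Int :=
  let Z : PySem.Set Int := A.foldl PySem.Set.add PySem.Set.empty
  let Z := A.foldl (fun Z i =>
    B.foldl (fun Z j => if i == j then PySem.Set.discard Z i else Z) Z) Z
  (PySem.List.max? Z (fun x => x)).getD 0

-- ===== PORT B =====
-- literal port of Source B: forbidden = set(B); first element of sorted(A, reverse=True)
-- not in forbidden; the ValueError case (no such element) is excluded by Pre_, port returns 0.
def WorksWithSets_alt (A : List Int) (B : List Int) : Int :=
  let forbidden : PySem.Set Int := PySem.Set.ofList B
  ((PySem.List.sorted A (fun x => x) true).find?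
      (fun x => !(PySem.Set.contains forbidden x))).getD 0

-- ===== PRECONDITION & SPEC =====
-- Pre_ excludes exactly the inputs where no element of A lies outside B: there
-- Python A's max() is applied to an empty set and raises ValueError (B raises too).
def Pre_WorksWithSets (A : List Int) (B : List Int) : Prop := ∃ x ∈ A, x ∉ B
instance (A : List Int) (B : List Int) : Decidable (Pre_WorksWithSets A B) := by
  unfold Pre_WorksWithSets; infer_instance

def pvWitness_WorksWithSets : List Int × List Int := ([3, 1, 7, 3], [7, 2])

def Spec_WorksWithSets (A : List Int) (B : List Int) (out : Int) : Prop := out = WorksWithSets_alt A B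
instance (A : List Int) (B : List Int) (out : Int) : Decidable (Spec_WorksWithSets A B out) := by unfold Spec_WorksWithSets; infer_instance

-- ===== CLAIM (what is proved, stated in full; the proofs are below) =====
def Claim_equal_WorksWithSets : Prop := ∀ (A : List Int) (B : List Int), Dom_WorksWithSets A B → Pre_WorksWithSets A B → Spec_WorksWithSets A B (WorksWithSets A B)

-- ===== LEMMAS AND PROOFS =====

-- membership after the inner loop 'for j in B: if i == j: Z.discard(i)'
theorem pv_mem_inner (B : List Int) (Z : PySem.Set Int) (i x : Int) :
    x ∈ B.foldl (fun Z j => if i == j then PySem.Set.discard Z i else Z) Z ↔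
      x ∈ Z ∧ ¬(x = i ∧ i ∈ B) := by
  induction B generalizing Z with
  | nil => simp
  | cons b bs ih =>
    simp only [List.foldl_cons, ih]
    by_cases hib : i = b
    · subst hib
      simp only [beq_self_eq_true, if_pos, PySem.Set.mem_discard, List.mem_cons]
      constructor
      · rintro ⟨⟨hZ, hne⟩, -⟩
        exact ⟨hZ, fun h => hne h.1⟩
      · rintro ⟨hZ, hni⟩
        refine ⟨⟨hZ, fun h => hni ⟨h, Or.inl trivial⟩⟩, fun h => hni ⟨h.1, Or.inl trivial⟩⟩
    · simp only [beq_iff_eq, if_neg hib, List.mem_cons]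
      constructor
      · rintro ⟨hZ, hni⟩
        refine ⟨hZ, ?_⟩
        rintro ⟨rfl, h | h⟩
        · exact hib h
        · exact hni ⟨rfl, h⟩
      · rintro ⟨hZ, hni⟩
        exact ⟨hZ, by rintro ⟨rfl, h⟩; exact hni ⟨rfl, Or.inr h⟩⟩

-- membership after the outer loop over A
theorem pv_mem_outer (A B : List Int) (Z : PySem.Set Int) (x : Int) :
    x ∈ A.foldl (fun Z i =>
        B.foldl (fun Z j => if i == j then PySem.Set.discard Z i else Z) Z) Z ↔
      x ∈ Z ∧ ∀ i ∈ A, ¬(x = i ∧ i ∈ B) := by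
  induction A generalizing Z with
  | nil => simp
  | cons a as ih =>
    simp only [List.foldl_cons, ih, pv_mem_inner, List.mem_cons]
    constructor
    · rintro ⟨⟨hZ, ha⟩, hrest⟩
      refine ⟨hZ, ?_⟩
      rintro i (rfl | hi) h
      · exact ha h
      · exact hrest i hi h
    · rintro ⟨hZ, hall⟩
      exact ⟨⟨hZ, hall a (Or.inl rfl)⟩, fun i hi => hall i (Or.inr hi)⟩

-- membership in A's final set: exactly the elements of A not in B
theorem pv_mem_Zfinal (A B : List Int) (x : Int) :
    x ∈ A.foldl (fun Z i =>
        B.foldl (fun Z j => if i == j then PySem.Set.discard Z i else Z) Z)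
        (A.foldl PySem.Set.add PySem.Set.empty) ↔ x ∈ A ∧ x ∉ B := by
  rw [pv_mem_outer]
  rw [show A.foldl PySem.Set.add PySem.Set.empty = PySem.Set.ofList A from
    (PySem.Set.ofList_eq_foldl A).symm]
  simp only [PySem.Set.mem_ofList]
  constructor
  · rintro ⟨hA, hall⟩
    exact ⟨hA, fun hB => hall x hA ⟨rfl, hB⟩⟩
  · rintro ⟨hA, hB⟩
    exact ⟨hA, by rintro i _ ⟨rfl, h⟩; exact hB h⟩

-- a descending list's first element satisfying p dominates all elements satisfying p
theorem pv_find_desc (l : List Int) (p : Int → Bool)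
    (hd : l.Pairwise (fun a b => b ≤ a)) {x : Int} (hx : l.find? p = some x) :
    p x = true ∧ x ∈ l ∧ ∀ y ∈ l, p y = true → y ≤ x := by
  induction l with
  | nil => simp at hx
  | cons a as ih =>
    rcases List.pairwise_cons.mp hd with ⟨hle, hd'⟩
    by_cases hpa : p a = true
    · rw [List.find?_cons_of_pos hpa] at hx
      cases hx
      refine ⟨hpa, List.mem_cons_self, ?_⟩
      intro y hy _
      rcases List.mem_cons.mp hy with rfl | hy'
      · exact le_refl _
      · exact hle y hy'
    · rw [List.find?_cons_of_neg (by simpa using hpa)] at hx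
      obtain ⟨hpx, hmem, hdom⟩ := ih hd' hx
      refine ⟨hpx, List.mem_cons_of_mem _ hmem, ?_⟩
      intro y hy hpy
      rcases List.mem_cons.mp hy with rfl | hy'
      · exact absurd hpy hpa
      · exact hdom y hy' hpy

-- ===== VERDICT (by name: the statement is the Claim_ definition above) =====
theorem WorksWithSets_spec : Claim_equal_WorksWithSets := by
  intro A B _ hpre
  obtain ⟨x0, hx0A, hx0B⟩ := hpre
  unfold Spec_WorksWithSets WorksWithSets WorksWithSets_alt
  show (PySem.List.max? (A.foldl (fun Z i =>
          B.foldl (fun Z j => if i == j then PySem.Set.discard Z i else Z) Z)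
          (A.foldl PySem.Set.add PySem.Set.empty)) (fun x => x)).getD 0
      = (List.find? (fun x => !(PySem.Set.contains (PySem.Set.ofList B) x))
          (PySem.List.sorted A (fun x => x) true)).getD 0
  -- A side: max? of the final set
  set Zf := A.foldl (fun Z i =>
      B.foldl (fun Z j => if i == j then PySem.Set.discard Z i else Z) Z)
      (A.foldl PySem.Set.add PySem.Set.empty) with hZf
  have hZmem : ∀ x, x ∈ Zf ↔ x ∈ A ∧ x ∉ B := fun x => pv_mem_Zfinal A B x
  have hZne : Zf ≠ [] := by
    intro h
    have := (hZmem x0).mpr ⟨hx0A, hx0B⟩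
    rw [h] at this; exact absurd this (List.not_mem_nil)
  obtain ⟨m, hm⟩ : ∃ m, PySem.List.max? Zf (fun x => x) = some m := by
    cases hmax : PySem.List.max? Zf (fun x => x) with
    | none => exact absurd ((PySem.List.max?_eq_none_iff _ _).mp hmax) hZne
    | some m => exact ⟨m, rfl⟩
  have hmmem : m ∈ A ∧ m ∉ B := (hZmem m).mp (PySem.List.max?_mem hm)
  have hmmax : ∀ y ∈ Zf, y ≤ m := PySem.List.max?_isMax hm
  -- B side: first eligible element of the descending sort
  set s := PySem.List.sorted A (fun x => x) true with hs
  have hperm : s.Perm A := PySem.List.sorted_perm A (fun x => x) true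
  have hdesc : s.Pairwise (fun a b => b ≤ a) := PySem.List.sorted_pairwise_rev A (fun x => x)
  have hpiff : ∀ x : Int, (!(PySem.Set.contains (PySem.Set.ofList B) x)) = true ↔ x ∉ B := by
    intro x
    simp [PySem.Set.mem_ofList]
  obtain ⟨f, hf⟩ : ∃ f, List.find? (fun x => !(PySem.Set.contains (PySem.Set.ofList B) x)) s = some f := by
    have : (List.find? (fun x => !(PySem.Set.contains (PySem.Set.ofList B) x)) s).isSome = true :=
      List.find?_isSome.mpr ⟨x0, hperm.mem_iff.mpr hx0A, (hpiff x0).mpr hx0B⟩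
    cases h : List.find? (fun x => !(PySem.Set.contains (PySem.Set.ofList B) x)) s with
    | none => rw [h] at this; simp at this
    | some f => exact ⟨f, rfl⟩
  obtain ⟨hpf, hfmem, hfdom⟩ := pv_find_desc s _ hdesc hf
  have hfA : f ∈ A ∧ f ∉ B := ⟨hperm.mem_iff.mp hfmem, (hpiff f).mp hpf⟩
  have hle1 : m ≤ f :=
    hfdom m (hperm.mem_iff.mpr hmmem.1) ((hpiff m).mpr hmmem.2)
  have hle2 : f ≤ m := hmmax f ((hZmem f).mpr hfA)
  rw [hm, hf]
  simp [le_antisymm hle2 hle1]
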